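-- pv_equiv track=rewrite | github.com/prausela/hangman | ahorcado/ahorcado.py | obtener_posiciones_de_las_letras
-- ===== SOURCE A (Python) =====
-- def obtener_posiciones_de_las_letras(palabra_elegida):
--   posiciones = dict()
--   for i in range(0, len(palabra_elegida)):
--     for j in range(0, len(palabra_elegida[i])):
--
--       if not palabra_elegida[i][j] in posiciones:
--         posiciones[palabra_elegida[i][j]] = []
--         for _ in range(0, len(palabra_elegida)):
--           posiciones[palabra_elegida[i][j]].append([])
--
--       posiciones[palabra_elegida[i][j]][i].append(j)
--
--   return posiciones
-- ===== SOURCE B (Python) =====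
-- def obtener_posiciones_de_las_letras(palabra_elegida):
--   per_word = []
--   for word in palabra_elegida:
--     d = {}
--     for j, ch in enumerate(word):
--       d.setdefault(ch, []).append(j)
--     per_word.append(d)
--   order = dict.fromkeys(ch for word in palabra_elegida for ch in word)
--   return {ch: [d.get(ch, []) for d in per_word] for ch in order}
-- ===== Notes on version B (the rewrite author's own statement) =====
-- stated objective: alternative
-- what changed: Replaces A's single interleaved pass with lazy whole-row preallocation by a two-stage decomposition: build an independent char-to-positions dict per word, compute the first-appearance character order once, then transpose into the result via per-word lookups defaulting to an empty position list.
import Mathlib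
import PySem

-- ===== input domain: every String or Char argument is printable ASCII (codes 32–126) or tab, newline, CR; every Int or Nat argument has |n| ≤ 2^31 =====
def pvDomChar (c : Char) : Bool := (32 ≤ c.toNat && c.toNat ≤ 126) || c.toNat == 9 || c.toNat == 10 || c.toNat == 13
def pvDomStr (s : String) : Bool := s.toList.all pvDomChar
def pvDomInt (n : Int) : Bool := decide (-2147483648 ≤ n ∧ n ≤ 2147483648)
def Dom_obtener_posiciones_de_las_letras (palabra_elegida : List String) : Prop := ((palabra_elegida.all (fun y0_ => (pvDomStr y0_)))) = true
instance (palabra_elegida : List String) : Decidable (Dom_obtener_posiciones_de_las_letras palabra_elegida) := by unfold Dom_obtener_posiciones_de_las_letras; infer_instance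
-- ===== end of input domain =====

-- B replaces A's interleaved lazy-preallocation pass by a per-word-dicts-then-transpose decomposition (alternative, same cost).


-- ===== PORT A =====
def obtener_posiciones_de_las_letras (palabra_elegida : List String) : List (String × List (List Int)) :=
  ((PySem.List.pyRange 0 (PySem.List.len palabra_elegida)).foldl (fun posiciones i =>
    let w := PySem.List.pyGetD palabra_elegida i ""
    (PySem.List.pyRange 0 (PySem.Str.len w)).foldl (fun posiciones j =>
      let c := String.ofList [PySem.List.pyGetD w.toList j ' ']
      let posiciones :=
        if posiciones.contains c then posiciones
        else posiciones.insert c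
          ((PySem.List.pyRange 0 (PySem.List.len palabra_elegida)).foldl
            (fun acc _ => acc ++ [([] : List Int)]) [])
      posiciones.modify c [] (fun ls =>
        PySem.List.pySetD ls i (PySem.List.pyGetD ls i [] ++ [j]))
    ) posiciones
  ) PySem.Dict.empty).items

-- ===== PORT B =====
def obtener_posiciones_de_las_letras_alt (palabra_elegida : List String) : List (String × List (List Int)) :=
  let perWord : List (PySem.Dict String (List Int)) :=
    palabra_elegida.map (fun word =>
      (PySem.List.enumerate word.toList).foldl
        (fun d p => d.modify (String.ofList [p.2]) [] (fun v => v ++ [p.1])) PySem.Dict.empty)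
  let order : List String :=
    PySem.List.dedup (palabra_elegida.flatMap (fun word => word.toList.map (fun c => String.ofList [c])))
  (order.foldl (fun res c => res.insert c (perWord.map (fun d => d.getD c []))) PySem.Dict.empty).items

-- ===== PRECONDITION & SPEC =====
def Spec_obtener_posiciones_de_las_letras (palabra_elegida : List String) (out : List (String × List (List Int))) : Prop := out = obtener_posiciones_de_las_letras_alt palabra_elegida
instance (palabra_elegida : List String) (out : List (String × List (List Int))) : Decidable (Spec_obtener_posiciones_de_las_letras palabra_elegida out) := by unfold Spec_obtener_posiciones_de_las_letras; infer_instance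

-- ===== CLAIM (what is proved, stated in full; the proofs are below) =====
def Claim_equal_obtener_posiciones_de_las_letras : Prop := ∀ (palabra_elegida : List String), Dom_obtener_posiciones_de_las_letras palabra_elegida → Spec_obtener_posiciones_de_las_letras palabra_elegida (obtener_posiciones_de_las_letras palabra_elegida)

-- ===== LEMMAS AND PROOFS =====

def pvKey (c : Char) : String := String.ofList [c]

def pvStep (W : Nat) (i : Int) (d : PySem.Dict String (List (List Int))) (p : Int × Char) :
    PySem.Dict String (List (List Int)) :=
  let c := pvKey p.2
  let d' := if d.contains c then d else d.insert c (List.replicate W [])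
  d'.modify c [] (fun ls => PySem.List.pySetD ls i (PySem.List.pyGetD ls i [] ++ [p.1]))

def pvBase (d : PySem.Dict String (List (List Int))) (key : String) (W : Nat) : List (List Int) :=
  if d.contains key then d.getD key [] else List.replicate W []

def pvPoss (key : String) (cs : List Char) (j0 : Int) : List Int :=
  (PySem.List.enumerate cs j0).filterMap (fun p => if pvKey p.2 = key then some p.1 else none)

def pvPosW (key : String) (w : String) : List Int := pvPoss key w.toList 0

def pvChars (ws : List String) : List String := ws.flatMap (fun w => w.toList.map pvKey)

lemma pvPoss_nil (key : String) (j0 : Int) : pvPoss key [] j0 = [] := by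
  simp [pvPoss, PySem.List.enumerate_nil]

lemma pvPoss_cons (key : String) (c : Char) (cs : List Char) (j0 : Int) :
    pvPoss key (c :: cs) j0 =
      (if pvKey c = key then [j0] else []) ++ pvPoss key cs (j0 + 1) := by
  simp only [pvPoss, PySem.List.enumerate_cons, List.filterMap_cons]
  by_cases h : pvKey c = key <;> simp [h]

lemma pvPoss_eq_nil_of_not_mem (key : String) (cs : List Char) (h : key ∉ cs.map pvKey) :
    ∀ j0, pvPoss key cs j0 = [] := by
  induction cs with
  | nil => intro j0; exact pvPoss_nil key j0
  | cons c cs ih =>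
    intro j0
    simp only [List.map_cons, List.mem_cons, not_or] at h
    rw [pvPoss_cons, if_neg (fun hh => h.1 hh.symm), ih h.2]
    rfl

lemma pvSet_take_succ {α : Type} (l : List α) (k : Nat) (v : α) (h : k < l.length) :
    (l.set k v).take (k + 1) = l.take k ++ [v] := by
  rw [List.set_eq_take_cons_drop v h, List.take_append]
  simp [List.length_take, Nat.min_eq_left (Nat.le_of_lt h), List.take_succ_cons]

lemma pvStep_contains (W : Nat) (k : Nat) (d : PySem.Dict String (List (List Int)))
    (j0 : Int) (c : Char) (key : String) :
    (pvStep W (k : Int) d (j0, c)).contains key = (key == pvKey c || d.contains key) := by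
  by_cases hdc : d.contains (pvKey c) = true
  · by_cases hkc : key = pvKey c <;> simp [pvStep, hdc, PySem.Dict.contains_modify, hkc]
  · simp only [pvStep, Bool.not_eq_true] at hdc ⊢
    rw [if_neg (by simp [hdc])]
    rw [PySem.Dict.contains_modify, PySem.Dict.contains_insert]
    by_cases hkc : key = pvKey c <;> simp [hkc]

lemma pvStep_getD (W : Nat) (k : Nat) (d : PySem.Dict String (List (List Int)))
    (j0 : Int) (c : Char) (key : String) :
    (pvStep W (k : Int) d (j0, c)).getD key [] =
      if key = pvKey c then
        (pvBase d (pvKey c) W).set k ((pvBase d (pvKey c) W).getD k [] ++ [j0])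
      else d.getD key [] := by
  by_cases hdc : d.contains (pvKey c) = true
  · by_cases hkc : key = pvKey c <;>
      simp [pvStep, hdc, hkc, PySem.Dict.getD_modify, pvBase,
        PySem.List.pySetD_natCast, PySem.List.pyGetD_natCast]
  · simp only [pvStep, if_neg hdc, PySem.Dict.getD_modify, PySem.List.pySetD_natCast,
      PySem.List.pyGetD_natCast, pvBase]
    by_cases hkc : key = pvKey c
    · simp [hkc, PySem.Dict.getD_insert, hdc]
    · simp [hkc, PySem.Dict.getD_insert]

lemma pvStep_keys (W : Nat) (k : Nat) (d : PySem.Dict String (List (List Int)))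
    (j0 : Int) (c : Char) :
    (pvStep W (k : Int) d (j0, c)).keys = PySem.Set.add d.keys (pvKey c) := by
  by_cases hdc : d.contains (pvKey c) = true
  · rw [pvStep, if_pos hdc, PySem.Dict.keys_modify, PySem.Dict.keys_insert_of_contains _ _ hdc]
    have hmem : pvKey c ∈ d.keys := (PySem.Dict.contains_iff_mem_keys d (pvKey c)).mp hdc
    rw [PySem.Set.add, if_pos (by simp [PySem.Set.contains, hmem])]
  · rw [pvStep, if_neg hdc, PySem.Dict.keys_modify]
    rw [PySem.Dict.keys_insert_of_contains _ _ (by simp [PySem.Dict.contains_insert])]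
    rw [PySem.Dict.keys_insert_of_not_contains _ _ (by simpa using hdc)]
    have hmem : pvKey c ∉ d.keys := fun hm =>
      absurd ((PySem.Dict.contains_iff_mem_keys d (pvKey c)).mpr hm) (by simpa using hdc)
    rw [PySem.Set.add, if_neg (by simp [PySem.Set.contains, hmem])]

lemma pvBase_length (d : PySem.Dict String (List (List Int))) (key : String) (W : Nat)
    (hlen : ∀ k, d.contains k = true → (d.getD k []).length = W) :
    (pvBase d key W).length = W := by
  by_cases h : d.contains key = true
  · simpa [pvBase, h] using hlen key h
  · simp [pvBase, h]

lemma pvInner (W k : Nat) (hk : k < W) (cs : List Char) :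
    ∀ (j0 : Int) (d : PySem.Dict String (List (List Int))),
    (∀ key, d.contains key = true → (d.getD key []).length = W) →
    ((PySem.List.enumerate cs j0).foldl (pvStep W (k : Int)) d).keys
        = PySem.Set.update d.keys (cs.map pvKey)
    ∧ (∀ key, ((PySem.List.enumerate cs j0).foldl (pvStep W (k : Int)) d).contains key
        = (decide (key ∈ cs.map pvKey) || d.contains key))
    ∧ (∀ key, ((PySem.List.enumerate cs j0).foldl (pvStep W (k : Int)) d).contains key = true →
        (((PySem.List.enumerate cs j0).foldl (pvStep W (k : Int)) d).getD key []).length = W)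
    ∧ (∀ key, ((PySem.List.enumerate cs j0).foldl (pvStep W (k : Int)) d).getD key []
        = if key ∈ cs.map pvKey then
            (pvBase d key W).set k ((pvBase d key W).getD k [] ++ pvPoss key cs j0)
          else d.getD key []) := by
  induction cs with
  | nil =>
    intro j0 d hlen
    refine ⟨rfl, ?_, ?_, ?_⟩ <;> intro key <;>
      simp [PySem.List.enumerate_nil, PySem.Set.update, hlen key]
    exact hlen key
  | cons c cs ih =>
    intro j0 d hlen
    rw [PySem.List.enumerate_cons]
    simp only [List.foldl_cons]
    set d1 := pvStep W (k : Int) d (j0, c) with hd1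
    have hlen1 : ∀ key, d1.contains key = true → (d1.getD key []).length = W := by
      intro key hc
      rw [hd1, pvStep_getD]
      by_cases hkc : key = pvKey c
      · simp only [if_pos hkc, List.length_set]
        exact pvBase_length d (pvKey c) W hlen
      · rw [if_neg hkc]
        apply hlen
        have := pvStep_contains W k d j0 c key
        rw [← hd1, hc] at this
        simpa [hkc] using this.symm
    obtain ⟨ihK, ihC, ihL, ihG⟩ := ih (j0 + 1) d1 hlen1
    refine ⟨?_, ?_, ihL, ?_⟩
    · rw [ihK, hd1, pvStep_keys]
      rfl
    · intro key
      rw [ihC key, hd1, pvStep_contains]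
      by_cases h1 : key ∈ cs.map pvKey <;> by_cases h2 : key = pvKey c <;>
        simp [h1, h2]
    · intro key
      rw [ihG key]
      have hbl : (pvBase d key W).length = W := pvBase_length d key W hlen
      by_cases h1 : key ∈ cs.map pvKey
      · rw [if_pos h1, if_pos (by simp [h1])]
        by_cases h2 : key = pvKey c
        · have hc1 : d1.contains key = true := by
            rw [hd1, pvStep_contains]; simp [h2]
          have hg1 : d1.getD key []
              = (pvBase d key W).set k ((pvBase d key W).getD k [] ++ [j0]) := by
            rw [hd1, pvStep_getD, if_pos h2, ← h2]
          have hB1 : pvBase d1 key W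
              = (pvBase d key W).set k ((pvBase d key W).getD k [] ++ [j0]) := by
            rw [pvBase, if_pos hc1, hg1]
          have hget : ((pvBase d key W).set k ((pvBase d key W).getD k [] ++ [j0])).getD k []
              = (pvBase d key W).getD k [] ++ [j0] := by
            rw [List.getD_eq_getElem _ _ (by rw [List.length_set, hbl]; omega)]
            exact List.getElem_set_self _
          rw [hB1, pvPoss_cons, if_pos h2.symm, hget, List.set_set, List.append_assoc,
            List.singleton_append]
        · have hc1 : d1.contains key = d.contains key := by
            rw [hd1, pvStep_contains]; simp [h2]
          have hg1 : d1.getD key [] = d.getD key [] := by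
            rw [hd1, pvStep_getD, if_neg h2]
          have hB1 : pvBase d1 key W = pvBase d key W := by
            rw [pvBase, pvBase, hc1, hg1]
          rw [hB1, pvPoss_cons, if_neg (fun hh => h2 hh.symm), List.nil_append]
      · rw [if_neg h1]
        by_cases h2 : key = pvKey c
        · rw [if_pos (by simp [h2]), hd1, pvStep_getD, if_pos h2, ← h2]
          rw [pvPoss_cons, if_pos h2.symm, pvPoss_eq_nil_of_not_mem key cs h1]
          simp
        · rw [if_neg (by simp [h1, h2]), hd1, pvStep_getD, if_neg h2]

lemma pvMap_nil_of_not_mem (key : String) (ws : List String) (h : key ∉ pvChars ws) :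
    ws.map (fun w => pvPosW key w) = List.replicate ws.length [] := by
  induction ws with
  | nil => rfl
  | cons w ws ih =>
    simp only [pvChars, List.flatMap_cons, List.mem_append, not_or] at h
    simp only [List.map_cons, List.length_cons, List.replicate_succ]
    rw [pvPosW, pvPoss_eq_nil_of_not_mem key w.toList h.1, ih h.2]

lemma pvOuter (W : Nat) (ws : List String) :
    ∀ (k : Nat), k + ws.length = W →
    ∀ (d : PySem.Dict String (List (List Int))),
    (∀ key, d.contains key = true → (d.getD key []).length = W ∧
        (d.getD key []).drop k = List.replicate ws.length ([] : List Int)) →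
    ((PySem.List.enumerate ws (k : Int)).foldl
        (fun d q => (PySem.List.enumerate q.2.toList).foldl (pvStep W q.1) d) d).keys
      = PySem.Set.update d.keys (pvChars ws)
    ∧ (∀ key, ((PySem.List.enumerate ws (k : Int)).foldl
        (fun d q => (PySem.List.enumerate q.2.toList).foldl (pvStep W q.1) d) d).getD key []
        = if key ∈ pvChars ws then
            (pvBase d key W).take k ++ ws.map (fun w => pvPosW key w)
          else d.getD key []) := by
  induction ws with
  | nil =>
    intro k hkW d hinv
    refine ⟨rfl, ?_⟩
    intro key
    simp [PySem.List.enumerate_nil, pvChars]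
  | cons w ws ih =>
    intro k hkW d hinv
    have hk : k < W := by simp only [List.length_cons] at hkW; omega
    rw [PySem.List.enumerate_cons]
    simp only [List.foldl_cons]
    have hlen : ∀ key, d.contains key = true → (d.getD key []).length = W :=
      fun key hc => (hinv key hc).1
    obtain ⟨iK, iC, iL, iG⟩ := pvInner W k hk w.toList 0 d hlen
    set d1 := (PySem.List.enumerate w.toList 0).foldl (pvStep W (k : Int)) d with hd1
    -- the k-th entry of pvBase d key W is []
    have hBk : ∀ key, (pvBase d key W).getD k [] = ([] : List Int) := by
      intro key
      by_cases hc : d.contains key = true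
      · have h2 := (hinv key hc).2
        rw [pvBase, if_pos hc, List.getD_eq_getElem?_getD]
        have hsome : (d.getD key [])[k]? = some ([] : List Int) := by
          have := congrArg (fun t : List (List Int) => t[0]?) h2
          simpa [List.getElem?_drop] using this
        rw [hsome]
        rfl
      · rw [pvBase, if_neg hc, List.getD_eq_getElem?_getD, List.getElem?_replicate]
        simp [hk]
    have hbl : ∀ key, (pvBase d key W).length = W := fun key => pvBase_length d key W hlen
    -- invariant for d1 at k+1
    have hinv1 : ∀ key, d1.contains key = true → (d1.getD key []).length = W ∧
        (d1.getD key []).drop (k + 1) = List.replicate ws.length ([] : List Int) := by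
      intro key hc
      refine ⟨iL key hc, ?_⟩
      rw [iG key]
      by_cases h1 : key ∈ w.toList.map pvKey
      · rw [if_pos h1, List.drop_set, if_pos (by omega)]
        by_cases hcd : d.contains key = true
        · rw [pvBase, if_pos hcd]
          have h2 := (hinv key hcd).2
          have : (d.getD key []).drop (k + 1) = ((d.getD key []).drop k).drop 1 := by
            rw [List.drop_drop]
          rw [this, h2]
          simp [List.drop_replicate]
        · rw [pvBase, if_neg hcd, List.drop_replicate]
          congr 1
          simp only [List.length_cons] at hkW
          omega
      · rw [if_neg h1]
        have hcd : d.contains key = true := by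
          have := iC key
          rw [hc] at this
          simpa [h1] using this.symm
        have h2 := (hinv key hcd).2
        have : (d.getD key []).drop (k + 1) = ((d.getD key []).drop k).drop 1 := by
          rw [List.drop_drop]
        rw [this, h2]
        simp [List.drop_replicate]
    have hcast : (k : Int) + 1 = ((k + 1 : Nat) : Int) := by push_cast; ring
    rw [hcast]
    obtain ⟨jK, jG⟩ := ih (k + 1) (by simp only [List.length_cons] at hkW ⊢; omega) d1 hinv1
    refine ⟨?_, ?_⟩
    · rw [jK, iK]
      simp only [pvChars, List.flatMap_cons, PySem.Set.update, List.foldl_append]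
    · intro key
      rw [jG key]
      have htake : ∀ v : List Int, ((pvBase d key W).set k v).take (k + 1)
          = (pvBase d key W).take k ++ [v] := fun v =>
        pvSet_take_succ _ k v (by rw [hbl key]; omega)
      by_cases h1 : key ∈ pvChars ws
      · rw [if_pos h1, if_pos (by rw [pvChars, List.flatMap_cons]; exact List.mem_append_right _ h1)]
        by_cases h2 : key ∈ w.toList.map pvKey
        · have hc1 : d1.contains key = true := by rw [iC key]; simp [h2]
          have hB1 : pvBase d1 key W
              = (pvBase d key W).set k (pvPosW key w) := by
            rw [pvBase, if_pos hc1, iG key, if_pos h2, hBk key, List.nil_append, pvPosW]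
          rw [hB1, htake, List.map_cons]
          simp
        · have hc1 : d1.contains key = d.contains key := by
            rw [iC key]; simp [h2]
          have hB1 : pvBase d1 key W = pvBase d key W := by
            rw [pvBase, pvBase, hc1, iG key, if_neg h2]
          rw [hB1, List.map_cons, pvPosW, pvPoss_eq_nil_of_not_mem key w.toList h2]
          -- take (k+1) B = take k B ++ [[]]
          have : (pvBase d key W).take (k + 1) = (pvBase d key W).take k ++ [([] : List Int)] := by
            rw [List.take_add_one]
            congr 1
            rw [List.getElem?_eq_getElem (by rw [hbl key]; omega)]
            have := hBk key
            rw [List.getD_eq_getElem _ _ (by rw [hbl key]; omega)] at this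
            simp [this]
          rw [this]
          simp
      · rw [if_neg h1]
        by_cases h2 : key ∈ w.toList.map pvKey
        · rw [if_pos (by rw [pvChars, List.flatMap_cons]; exact List.mem_append_left _ h2)]
          rw [iG key, if_pos h2, hBk key, List.nil_append]
          rw [List.set_eq_take_cons_drop _ (by rw [hbl key]; omega)]
          have hdrop : (pvBase d key W).drop (k + 1) = List.replicate ws.length ([] : List Int) := by
            by_cases hcd : d.contains key = true
            · rw [pvBase, if_pos hcd]
              have h2' := (hinv key hcd).2
              have : (d.getD key []).drop (k + 1) = ((d.getD key []).drop k).drop 1 := by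
                rw [List.drop_drop]
              rw [this, h2']
              simp [List.drop_replicate]
            · rw [pvBase, if_neg hcd, List.drop_replicate]
              congr 1
              simp only [List.length_cons] at hkW
              omega
          rw [hdrop, List.map_cons, pvMap_nil_of_not_mem key ws h1, pvPosW]
        · rw [if_neg (fun hmem => by
            rw [pvChars, List.flatMap_cons] at hmem
            exact (List.mem_append.mp hmem).elim (fun h => h2 h) (fun h => h1 h))]
          rw [iG key, if_neg h2]

lemma pvBlank (ps : List String) :
    (PySem.List.pyRange 0 (PySem.List.len ps)).foldl (fun acc _ => acc ++ [([] : List Int)]) []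
      = List.replicate ps.length [] := by
  have h := PySem.List.foldl_append_singleton_eq_map (fun _ : Int => ([] : List Int))
    (PySem.List.pyRange 0 (PySem.List.len ps)) []
  rw [h]
  simp [List.map_const', PySem.List.length_pyRange_one, PySem.List.len]

lemma portA_eq (ps : List String) :
    obtener_posiciones_de_las_letras ps =
      ((PySem.List.enumerate ps).foldl
        (fun d q => (PySem.List.enumerate q.2.toList).foldl (pvStep ps.length q.1) d)
        PySem.Dict.empty).items := by
  unfold obtener_posiciones_de_las_letras
  rw [PySem.List.enumerate_eq_map_pyRange ps "", List.foldl_map]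
  congr 1
  apply PySem.List.foldl_congr_mem
  intro d i _
  dsimp only
  rw [PySem.List.enumerate_eq_map_pyRange (PySem.List.pyGetD ps i "").toList ' ', List.foldl_map]
  have hlen : PySem.Str.len (PySem.List.pyGetD ps i "")
      = PySem.List.len (PySem.List.pyGetD ps i "").toList := by
    rw [PySem.Str.len_eq, PySem.List.len_eq]
  rw [hlen]
  apply PySem.List.foldl_congr_mem
  intro d' j _
  simp only [pvStep, pvKey, pvBlank ps]

lemma pvBmap (cs : List Char) : ∀ (j0 : Int) (d : PySem.Dict String (List Int)) (key : String),
    ((PySem.List.enumerate cs j0).foldl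
      (fun d p => d.modify (String.ofList [p.2]) [] (fun v => v ++ [p.1])) d).getD key []
    = d.getD key [] ++ pvPoss key cs j0 := by
  induction cs with
  | nil => intro j0 d key; simp [PySem.List.enumerate_nil, pvPoss_nil]
  | cons c cs ih =>
    intro j0 d key
    rw [PySem.List.enumerate_cons]
    simp only [List.foldl_cons]
    rw [ih, pvPoss_cons, PySem.Dict.getD_modify]
    by_cases h : key = String.ofList [c]
    · rw [if_pos h, if_pos (show pvKey c = key from h.symm)]
      rw [h]
      simp
    · rw [if_neg h, if_neg (fun hh : pvKey c = key => h hh.symm), List.nil_append]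

lemma pvMain (ps : List String) :
    obtener_posiciones_de_las_letras ps = obtener_posiciones_de_las_letras_alt ps := by
  obtain ⟨hK, hG⟩ := pvOuter ps.length ps 0 (by simp) PySem.Dict.empty
    (by intro key h; simp [PySem.Dict.contains_empty] at h)
  rw [Nat.cast_zero] at hK hG
  rw [portA_eq]
  have hkeys : ((PySem.List.enumerate ps).foldl
      (fun d q => (PySem.List.enumerate q.2.toList).foldl (pvStep ps.length q.1) d)
      PySem.Dict.empty).keys = PySem.Set.ofList (pvChars ps) := by
    rw [hK, PySem.Dict.keys_empty]
    rfl
  rw [PySem.Dict.items_eq_map_keys _ (by rw [hkeys]; exact PySem.Set.nodup_ofList _) ([] : List (List Int)),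
    hkeys]
  have hA : (PySem.Set.ofList (pvChars ps)).map (fun key => (key,
        ((PySem.List.enumerate ps).foldl
          (fun d q => (PySem.List.enumerate q.2.toList).foldl (pvStep ps.length q.1) d)
          PySem.Dict.empty).getD key []))
      = (PySem.Set.ofList (pvChars ps)).map (fun key => (key, ps.map (fun w => pvPosW key w))) := by
    apply List.map_congr_left
    intro key hmem
    have hmem' : key ∈ pvChars ps := (PySem.Set.mem_ofList _ _).mp hmem
    rw [hG key, if_pos hmem']
    simp
  rw [hA]
  -- B side
  show _ = obtener_posiciones_de_las_letras_alt ps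
  unfold obtener_posiciones_de_las_letras_alt
  dsimp only
  rw [PySem.Dict.items_foldl_insert_fresh _ (fun c => c) _ PySem.Dict.empty
    (fun a _ => PySem.Dict.contains_empty a)
    (by simpa [PySem.List.dedup_eq_ofList] using
      PySem.Set.nodup_ofList (ps.flatMap (fun w => w.toList.map (fun c => String.ofList [c]))))]
  have horder : PySem.List.dedup (ps.flatMap (fun w => w.toList.map (fun c => String.ofList [c])))
      = PySem.Set.ofList (pvChars ps) := by
    rw [PySem.List.dedup_eq_ofList]
    rfl
  rw [horder]
  show List.map _ _ = _
  rw [show (PySem.Dict.empty : PySem.Dict String (List (List Int))).items = [] from rfl,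
    List.nil_append]
  apply List.map_congr_left
  intro key hmem
  congr 1
  rw [List.map_map]
  apply List.map_congr_left
  intro w _
  symm
  show ((PySem.List.enumerate w.toList).foldl
      (fun d p => d.modify (String.ofList [p.2]) [] (fun v => v ++ [p.1]))
      PySem.Dict.empty).getD key [] = pvPosW key w
  rw [pvBmap, PySem.Dict.getD_empty, List.nil_append, pvPosW]

-- ===== VERDICT (by name: the statement is the Claim_ definition above) =====
theorem obtener_posiciones_de_las_letras_spec : Claim_equal_obtener_posiciones_de_las_letras := by
  intro ps _
  unfold Spec_obtener_posiciones_de_las_letras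
  exact pvMain ps
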